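-- pv_equiv track=rewrite | github.com/kaszycaO/AMH | l3/z1/main.py | check_if_end
-- ===== SOURCE A (Python) =====
-- def check_if_end(swarm):
--     last = swarm[0][0]
--     same = True
--     stopped = True
--     for bee in swarm:
--         # sprawdzany jest przypadek gdy osobniki sie pokryja
--         if bee[0] != last and same == True:
--             same = False
--         # sprawdzany jest przypadek gdy predkosc wszystkich osobnikow jest 0
--         if bee[3] != 0 and stopped == True:
--             stopped = False
--
--         if stopped == False and same == False:
--             return False
--
--         last = bee[0]
--
--     return True
-- ===== SOURCE B (Python) =====
-- def check_if_end(swarm):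
--     positions = {bee[0] for bee in swarm}
--     return len(positions) <= 1 or not any(bee[3] for bee in swarm)
-- ===== Notes on version B (the rewrite author's own statement) =====
-- stated objective: alternative
-- what changed: Replaces A's fused early-exit state-machine loop (consecutive-position comparison plus flags) with a set of all positions (termination iff at most one distinct position) or-ed with an any() scan of velocities; no element-to-element comparisons remain.
-- outside the precondition, e.g. on check_if_end([[1, 0, 0, 1], [2, 0, 0, 1], [5]]): A returns False, B returns False
import Mathlib
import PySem

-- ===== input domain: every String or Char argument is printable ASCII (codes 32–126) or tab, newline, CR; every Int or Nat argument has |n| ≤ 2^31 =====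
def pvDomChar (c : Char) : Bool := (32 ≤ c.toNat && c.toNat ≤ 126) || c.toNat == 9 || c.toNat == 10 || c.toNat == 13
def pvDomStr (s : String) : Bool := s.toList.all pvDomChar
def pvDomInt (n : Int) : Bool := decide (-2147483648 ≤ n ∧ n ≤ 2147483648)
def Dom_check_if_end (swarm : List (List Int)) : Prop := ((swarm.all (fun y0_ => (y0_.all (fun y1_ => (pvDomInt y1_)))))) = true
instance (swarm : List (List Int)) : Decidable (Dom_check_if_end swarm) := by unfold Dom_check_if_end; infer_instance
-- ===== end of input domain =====

-- B decides "same position" by collecting the distinct positions into a set instead of comparing elements.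

-- ===== PORT A =====
-- the for-loop of A: state (last, same, stopped); none = IndexError inside the loop
def chLoopA : List (List Int) → Int → Bool → Bool → Option Bool
  | [], _, _, _ => some true
  | bee :: rest, last, same, stopped =>
    match PySem.List.pyGet? bee 0, PySem.List.pyGet? bee 3 with
    | some b0, some b3 =>
      let same' := if b0 ≠ last ∧ same = true then false else same
      let stopped' := if b3 ≠ 0 ∧ stopped = true then false else stopped
      if stopped' = false ∧ same' = false then some false
      else chLoopA rest b0 same' stopped'
    | _, _ => none

def check_if_end (swarm : List (List Int)) : Bool :=
  match PySem.List.pyGet? swarm 0 with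
  | none => false   -- IndexError, excluded by Pre_
  | some row0 =>
    match PySem.List.pyGet? row0 0 with
    | none => false -- IndexError, excluded by Pre_
    | some last =>
      match chLoopA swarm last true true with
      | some r => r
      | none => false -- IndexError mid-loop, excluded by Pre_

-- ===== PORT B =====
-- {bee[0] for bee in swarm}: the bee[0] values in order; none = IndexError
def altHeads : List (List Int) → Option (List Int)
  | [] => some []
  | bee :: rest =>
    match PySem.List.pyGet? bee 0 with
    | some v => (altHeads rest).map (v :: ·)
    | none => none

-- any(bee[3] for bee in swarm); none = IndexError
def altAny : List (List Int) → Option Bool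
  | [] => some false
  | bee :: rest =>
    match PySem.List.pyGet? bee 3 with
    | some v => if v ≠ 0 then some true else altAny rest
    | none => none

def check_if_end_alt (swarm : List (List Int)) : Bool :=
  match altHeads swarm with
  | none => false   -- IndexError while building the set, excluded by Pre_
  | some hs =>
    let positions : PySem.Set Int := PySem.Set.ofList hs
    if positions.length ≤ 1 then true
    else
      match altAny swarm with
      | some mv => !mv
      | none => false -- IndexError in any(), excluded by Pre_

-- ===== PRECONDITION & SPEC =====
-- Pre_ excludes the empty swarm and swarms containing a bee of length < 4: on those A
-- raises IndexError, except when its early exit returns False before reaching the short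
-- bee — there B also returns False, but those inputs stay outside this claim.
def Pre_check_if_end (swarm : List (List Int)) : Prop :=
  swarm ≠ [] ∧ ∀ bee ∈ swarm, 4 ≤ bee.length
instance (swarm : List (List Int)) : Decidable (Pre_check_if_end swarm) := by
  unfold Pre_check_if_end; infer_instance
def pvWitness_check_if_end : List (List Int) := [[0, 1, 2, 3], [0, 5, 6, 0]]
def Spec_check_if_end (swarm : List (List Int)) (out : Bool) : Prop := out = check_if_end_alt swarm
instance (swarm : List (List Int)) (out : Bool) : Decidable (Spec_check_if_end swarm out) := by unfold Spec_check_if_end; infer_instance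

-- ===== CLAIM (what is proved, stated in full; the proofs are below) =====
def Claim_equal_check_if_end : Prop := ∀ (swarm : List (List Int)), Dom_check_if_end swarm → Pre_check_if_end swarm → Spec_check_if_end swarm (check_if_end swarm)

-- ===== LEMMAS AND PROOFS =====

-- abstract values, on heads (used only in proofs)
def specSame : List (List Int) → Int → Bool
  | [], _ => true
  | bee :: rest, last => (bee.headI == last) && specSame rest bee.headI

def specStop : List (List Int) → Bool
  | [] => true
  | bee :: rest => (PySem.List.pyGetD bee 3 0 == 0) && specStop rest

theorem pyGet?_head (bee : List Int) (h : 4 ≤ bee.length) :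
    PySem.List.pyGet? bee 0 = some bee.headI := by
  cases bee with
  | nil => simp at h
  | cons a t => simp

theorem pyGet?_three (bee : List Int) (h : 4 ≤ bee.length) :
    PySem.List.pyGet? bee 3 = some (PySem.List.pyGetD bee 3 0) := by
  have h3 : (3 : Nat) < bee.length := by omega
  have hc : (3 : Int) = ((3 : Nat) : Int) := by norm_num
  rw [hc, PySem.List.pyGet?_natCast, PySem.List.pyGetD_natCast]
  simp [List.getD, h3]

theorem chLoopA_eq (swarm : List (List Int)) :
    ∀ (last : Int) (same stopped : Bool), (∀ bee ∈ swarm, 4 ≤ bee.length) →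
    (same || stopped) = true →
    chLoopA swarm last same stopped
      = some ((same && specSame swarm last) || (stopped && specStop swarm)) := by
  induction swarm with
  | nil =>
    intro last same stopped _ hso
    simp only [chLoopA, specSame, specStop, Bool.and_true]
    rw [hso]
  | cons bee rest ih =>
    intro last same stopped h hso
    have hb : 4 ≤ bee.length := h bee (by simp)
    have hrest : ∀ b ∈ rest, 4 ≤ b.length := fun b hb' => h b (by simp [hb'])
    rw [chLoopA, pyGet?_head bee hb, pyGet?_three bee hb]
    simp only [specSame, specStop]
    set b0 := bee.headI
    set b3 := PySem.List.pyGetD bee 3 0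
    have hsame' : (if b0 ≠ last ∧ same = true then false else same)
        = (same && (b0 == last)) := by
      by_cases hbl : b0 = last <;> cases same <;> simp [hbl]
    have hstop' : (if b3 ≠ 0 ∧ stopped = true then false else stopped)
        = (stopped && (b3 == 0)) := by
      by_cases hbz : b3 = 0 <;> cases stopped <;> simp [hbz]
    rw [hsame', hstop']
    by_cases hret : (same && (b0 == last)) = false ∧ (stopped && (b3 == 0)) = false
    · rw [if_pos ⟨hret.2, hret.1⟩]
      rcases hret with ⟨h1, h2⟩
      cases same <;> cases stopped <;> simp_all
    · have hso' : ((same && (b0 == last)) || (stopped && (b3 == 0))) = true := by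
        cases h1 : (same && (b0 == last)) <;> cases h2 : (stopped && (b3 == 0)) <;>
          simp_all
      rw [if_neg (by tauto), ih b0 _ _ hrest hso']
      simp [Bool.and_assoc]

theorem specSame_iff (r : List (List Int)) :
    ∀ x, specSame r x = true ↔ ∀ b ∈ r, b.headI = x := by
  induction r with
  | nil => intro x; simp [specSame]
  | cons b r ih =>
    intro x
    simp only [specSame, Bool.and_eq_true, beq_iff_eq, List.mem_cons]
    constructor
    · rintro ⟨hx, hrest⟩ c hc
      rcases hc with rfl | hc
      · exact hx
      · rw [(ih b.headI).mp hrest c hc, hx]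
    · intro hall
      refine ⟨hall b (Or.inl rfl), (ih b.headI).mpr ?_⟩
      intro c hc
      rw [hall c (Or.inr hc), hall b (Or.inl rfl)]

theorem altHeads_eq (swarm : List (List Int)) (h : ∀ bee ∈ swarm, 4 ≤ bee.length) :
    altHeads swarm = some (swarm.map List.headI) := by
  induction swarm with
  | nil => simp [altHeads]
  | cons bee rest ih =>
    have hb : 4 ≤ bee.length := h bee (by simp)
    rw [altHeads, pyGet?_head bee hb, ih (fun b hb' => h b (by simp [hb']))]
    simp

theorem altAny_eq (swarm : List (List Int)) (h : ∀ bee ∈ swarm, 4 ≤ bee.length) :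
    altAny swarm = some (!specStop swarm) := by
  induction swarm with
  | nil => simp [altAny, specStop]
  | cons bee rest ih =>
    have hb : 4 ≤ bee.length := h bee (by simp)
    rw [altAny, pyGet?_three bee hb, specStop]
    by_cases hz : PySem.List.pyGetD bee 3 0 = 0
    · simp [hz, ih (fun b hb' => h b (by simp [hb']))]
    · simp [hz]

-- a nodup list whose elements all equal x has at most one element
theorem nodup_all_eq_len (l : List Int) (x : Int) (hnd : l.Nodup)
    (hall : ∀ a ∈ l, a = x) : l.length ≤ 1 := by
  match l with
  | [] => simp
  | [a] => simp
  | a :: b :: t =>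
    have ha : a = x := hall a (by simp)
    have hb : b = x := hall b (by simp)
    have : a ∉ b :: t := (List.nodup_cons.mp hnd).1
    exact absurd (by simp [ha, hb]) this

theorem setLen_le_one (x : Int) (l : List Int) :
    (PySem.Set.ofList (x :: l)).length ≤ 1 ↔ ∀ a ∈ l, a = x := by
  constructor
  · intro hle a ha
    have hx : x ∈ PySem.Set.ofList (x :: l) := by
      rw [PySem.Set.mem_ofList]; simp
    have hA : a ∈ PySem.Set.ofList (x :: l) := by
      rw [PySem.Set.mem_ofList]; simp [ha]
    match hS : PySem.Set.ofList (x :: l), hle' : hle with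
    | [], _ => rw [hS] at hx; simp at hx
    | [y], _ =>
      rw [hS] at hx hA; simp at hx hA; rw [hA, hx]
    | y :: z :: t, hle2 => rw [hS] at hle; simp at hle
  · intro hall
    exact nodup_all_eq_len _ x (PySem.Set.nodup_ofList _)
      (fun a ha => by
        have hm : a ∈ x :: l := (PySem.Set.mem_ofList _ _).mp ha
        rcases List.mem_cons.mp hm with h | h
        · exact h
        · exact hall a h)

-- ===== VERDICT (by name: the statement is the Claim_ definition above) =====
theorem check_if_end_spec : Claim_equal_check_if_end := by
  intro swarm _ hpre
  obtain ⟨hne, hlen⟩ := hpre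
  unfold Spec_check_if_end
  cases swarm with
  | nil => exact absurd rfl hne
  | cons bee rest =>
    have hb : 4 ≤ bee.length := hlen bee (by simp)
    unfold check_if_end check_if_end_alt
    rw [PySem.List.pyGet?_zero_cons]
    dsimp only
    rw [pyGet?_head bee hb]
    dsimp only
    rw [altHeads_eq _ hlen, chLoopA_eq _ bee.headI true true hlen (by simp)]
    dsimp only
    simp only [List.map_cons]
    have hsame : specSame (bee :: rest) bee.headI = specSame rest bee.headI := by
      simp [specSame]
    by_cases hc : (PySem.Set.ofList (bee.headI :: rest.map List.headI)).length ≤ 1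
    · rw [if_pos hc]
      have : specSame rest bee.headI = true := by
        rw [specSame_iff]
        intro b hbm
        exact (setLen_le_one _ _).mp hc b.headI (List.mem_map_of_mem hbm)
      simp [hsame, this]
    · rw [if_neg hc, altAny_eq _ hlen]
      have : specSame rest bee.headI = false := by
        rw [← Bool.not_eq_true, specSame_iff]
        intro hall
        exact hc ((setLen_le_one _ _).mpr (by
          intro a ha
          rcases List.mem_map.mp ha with ⟨b, hbm, rfl⟩
          exact hall b hbm))
      simp [hsame, this]
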